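-- pv_equiv track=rewrite | github.com/PersShin/DataStructure | 동적계획법/백준 9184.py | modul
-- ===== SOURCE A (Python) =====
-- def modul(a,b,c):
--     if a<=0 or b<=0 or c<=0:
--         return 1
--     if a>20 or b>20 or c>20:
--         return modul(20,20,20)
--     if w[a][b][c]==0:
--         if a<b<c:
--             w[a][b][c]=modul(a,b,c-1)+modul(a,b-1,c-1)-modul(a,b-1,c)
--         else:
--             w[a][b][c]=modul(a-1, b, c) + modul(a-1, b-1, c) + modul(a-1, b, c-1) - modul(a-1, b-1, c-1)
--     return w[a][b][c]
--
-- w=[[[0 for _ in range(21)] for _ in range(21)] for _ in range(21)]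
-- ===== SOURCE B (Python) =====
-- def _g(t, a, b, c):
--     if a <= 0 or b <= 0 or c <= 0:
--         return 1
--     return t.get((a, b, c), 0)
--
-- def _build():
--     t = {}
--     for a in range(1, 21):
--         for b in range(1, 21):
--             for c in range(1, 21):
--                 if a < b < c:
--                     t[(a, b, c)] = _g(t, a, b, c - 1) + _g(t, a, b - 1, c - 1) - _g(t, a, b - 1, c)
--                 else:
--                     t[(a, b, c)] = _g(t, a - 1, b, c) + _g(t, a - 1, b - 1, c) + _g(t, a - 1, b, c - 1) - _g(t, a - 1, b - 1, c - 1)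
--     return t
--
-- _w = _build()
--
-- def modul(a, b, c):
--     if a <= 0 or b <= 0 or c <= 0:
--         return 1
--     if a > 20 or b > 20 or c > 20:
--         return _w[(20, 20, 20)]
--     return _w[(a, b, c)]
-- ===== Notes on version B (the rewrite author's own statement) =====
-- stated objective: alternative
-- what changed: Replaced the top-down recursive memoization over a mutable global table by a bottom-up tabulation: a dict of all 20x20x20 values is precomputed once by three nested loops applying the same recurrence, and modul becomes guard checks plus a table lookup.
import Mathlib
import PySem

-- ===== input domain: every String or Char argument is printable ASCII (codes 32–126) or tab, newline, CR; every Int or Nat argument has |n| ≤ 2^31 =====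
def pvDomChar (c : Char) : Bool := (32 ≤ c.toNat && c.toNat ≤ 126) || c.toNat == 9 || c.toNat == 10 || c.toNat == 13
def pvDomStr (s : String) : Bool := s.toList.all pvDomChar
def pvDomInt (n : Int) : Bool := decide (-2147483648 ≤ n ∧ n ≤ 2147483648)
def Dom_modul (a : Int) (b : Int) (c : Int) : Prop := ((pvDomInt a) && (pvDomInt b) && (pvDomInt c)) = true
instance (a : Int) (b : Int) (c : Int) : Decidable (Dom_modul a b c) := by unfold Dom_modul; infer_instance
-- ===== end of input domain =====

-- B replaces A's top-down recursive memoization by a bottom-up tabulation of the same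
-- recurrence (alternative decomposition, same cost). A mutates the module-level table `w`
-- in place; the equivalence proved here is about the return value only (the cache stores
-- exactly the recurrence's own values, so a fresh cache per call returns the same values).

-- ===== PORT A =====
-- A's global memo table `w` is ported as a dict threaded through the recursion
-- (Python's `w[a][b][c] == 0` on the 0-initialized table is exactly `getD (a,b,c) 0 == 0`).
-- The recursion is totalized with a fuel argument; a call decreases a+b+c by at least 1 and
-- the base test comes before the fuel match, so with fuel ≥ a+b+c (what modul passes) the
-- fuel branch is never taken and the value is exactly the Python recursion's.
def modulMemoF (fuel : Nat) (a b c : Int) (m : PySem.Dict (Int × Int × Int) Int) :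
    Int × PySem.Dict (Int × Int × Int) Int :=
  if a ≤ 0 ∨ b ≤ 0 ∨ c ≤ 0 then (1, m)
  else match fuel with
  | 0 => (0, m)
  | Nat.succ f =>
    if m.getD (a, b, c) 0 == 0 then
      if a < b ∧ b < c then
        ((modulMemoF f a b (c - 1) m).1
          + (modulMemoF f a (b - 1) (c - 1) (modulMemoF f a b (c - 1) m).2).1
          - (modulMemoF f a (b - 1) c (modulMemoF f a (b - 1) (c - 1) (modulMemoF f a b (c - 1) m).2).2).1,
         (modulMemoF f a (b - 1) c (modulMemoF f a (b - 1) (c - 1) (modulMemoF f a b (c - 1) m).2).2).2.insert (a, b, c)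
           ((modulMemoF f a b (c - 1) m).1
             + (modulMemoF f a (b - 1) (c - 1) (modulMemoF f a b (c - 1) m).2).1
             - (modulMemoF f a (b - 1) c (modulMemoF f a (b - 1) (c - 1) (modulMemoF f a b (c - 1) m).2).2).1))
      else
        ((modulMemoF f (a - 1) b c m).1
          + (modulMemoF f (a - 1) (b - 1) c (modulMemoF f (a - 1) b c m).2).1
          + (modulMemoF f (a - 1) b (c - 1) (modulMemoF f (a - 1) (b - 1) c (modulMemoF f (a - 1) b c m).2).2).1
          - (modulMemoF f (a - 1) (b - 1) (c - 1) (modulMemoF f (a - 1) b (c - 1) (modulMemoF f (a - 1) (b - 1) c (modulMemoF f (a - 1) b c m).2).2).2).1,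
         (modulMemoF f (a - 1) (b - 1) (c - 1) (modulMemoF f (a - 1) b (c - 1) (modulMemoF f (a - 1) (b - 1) c (modulMemoF f (a - 1) b c m).2).2).2).2.insert (a, b, c)
           ((modulMemoF f (a - 1) b c m).1
             + (modulMemoF f (a - 1) (b - 1) c (modulMemoF f (a - 1) b c m).2).1
             + (modulMemoF f (a - 1) b (c - 1) (modulMemoF f (a - 1) (b - 1) c (modulMemoF f (a - 1) b c m).2).2).1
             - (modulMemoF f (a - 1) (b - 1) (c - 1) (modulMemoF f (a - 1) b (c - 1) (modulMemoF f (a - 1) (b - 1) c (modulMemoF f (a - 1) b c m).2).2).2).1))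
    else (m.getD (a, b, c) 0, m)


-- Python's out-of-range branch recurses as modul(20,20,20), which runs the in-range code:
-- the wrapper does exactly A's three guards around the memoized recursion.
def modul (a : Int) (b : Int) (c : Int) : Int :=
  if a ≤ 0 ∨ b ≤ 0 ∨ c ≤ 0 then 1
  else if a > 20 ∨ b > 20 ∨ c > 20 then (modulMemoF 60 20 20 20 PySem.Dict.empty).1
  else (modulMemoF (a.toNat + b.toNat + c.toNat) a b c PySem.Dict.empty).1


-- ===== PORT B =====
-- getT is Source B's _g; innerF/midF/outF are the three nested build loops of Source B's _build,
-- buildW the precomputed table _w.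
def getT (t : PySem.Dict (Int × Int × Int) Int) (a : Int) (b : Int) (c : Int) : Int :=
  if a ≤ 0 ∨ b ≤ 0 ∨ c ≤ 0 then 1 else t.getD (a, b, c) 0

def innerF (a b : Int) (t : PySem.Dict (Int × Int × Int) Int) (c : Int) :
    PySem.Dict (Int × Int × Int) Int :=
  if a < b ∧ b < c then
    t.insert (a, b, c) (getT t a b (c - 1) + getT t a (b - 1) (c - 1) - getT t a (b - 1) c)
  else
    t.insert (a, b, c) (getT t (a - 1) b c + getT t (a - 1) (b - 1) c +
      getT t (a - 1) b (c - 1) - getT t (a - 1) (b - 1) (c - 1))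

def midF (a : Int) (t : PySem.Dict (Int × Int × Int) Int) (b : Int) :
    PySem.Dict (Int × Int × Int) Int :=
  (PySem.List.pyRange 1 21 1).foldl (innerF a b) t

def outF (t : PySem.Dict (Int × Int × Int) Int) (a : Int) :
    PySem.Dict (Int × Int × Int) Int :=
  (PySem.List.pyRange 1 21 1).foldl (midF a) t

def buildW : PySem.Dict (Int × Int × Int) Int :=
  (PySem.List.pyRange 1 21 1).foldl outF PySem.Dict.empty

def modul_alt (a : Int) (b : Int) (c : Int) : Int :=
  if a ≤ 0 ∨ b ≤ 0 ∨ c ≤ 0 then 1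
  else if a > 20 ∨ b > 20 ∨ c > 20 then buildW.getD (20, 20, 20) 0
  else buildW.getD (a, b, c) 0

-- ===== PRECONDITION & SPEC =====
def Spec_modul (a : Int) (b : Int) (c : Int) (out : Int) : Prop := out = modul_alt a b c
instance (a : Int) (b : Int) (c : Int) (out : Int) : Decidable (Spec_modul a b c out) := by unfold Spec_modul; infer_instance

-- ===== CLAIM (what is proved, stated in full; the proofs are below) =====
def Claim_equal_modul : Prop := ∀ (a : Int) (b : Int) (c : Int), Dom_modul a b c → Spec_modul a b c (modul a b c)

-- ===== LEMMAS AND PROOFS =====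

-- The pure value of the recurrence (proof-side specification; used by neither port).
def W (a : Int) (b : Int) (c : Int) : Int :=
  if a ≤ 0 ∨ b ≤ 0 ∨ c ≤ 0 then 1
  else if a < b ∧ b < c then W a b (c - 1) + W a (b - 1) (c - 1) - W a (b - 1) c
  else W (a - 1) b c + W (a - 1) (b - 1) c + W (a - 1) b (c - 1) - W (a - 1) (b - 1) (c - 1)
termination_by (a.toNat, (b + c).toNat)
decreasing_by
  all_goals first
    | (apply Prod.Lex.left; omega)
    | (apply Prod.Lex.right; omega)

def MemoInv (m : PySem.Dict (Int × Int × Int) Int) : Prop :=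
  ∀ x y z : Int, m.getD (x, y, z) 0 = 0 ∨ m.getD (x, y, z) 0 = W x y z

theorem memoInv_insert (m : PySem.Dict (Int × Int × Int) Int) (a b c v : Int)
    (hm : MemoInv m) (hv : v = W a b c) : MemoInv (m.insert (a, b, c) v) := by
  intro x y z
  rw [PySem.Dict.getD_insert]
  split_ifs with h
  · right
    simp only [Prod.mk.injEq] at h
    obtain ⟨hx, hy, hz⟩ := h
    subst hx hy hz
    exact hv
  · exact hm x y z

theorem memo_correct (fuel : Nat) :
    ∀ (a b c : Int) (m : PySem.Dict (Int × Int × Int) Int),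
      a.toNat + b.toNat + c.toNat ≤ fuel → MemoInv m →
      (modulMemoF fuel a b c m).1 = W a b c ∧ MemoInv (modulMemoF fuel a b c m).2 := by
  induction fuel with
  | zero =>
    intro a b c m hf hm
    have hb : a ≤ 0 ∨ b ≤ 0 ∨ c ≤ 0 := by omega
    rw [modulMemoF, if_pos hb]
    exact ⟨by rw [W, if_pos hb], hm⟩
  | succ f ih =>
    intro a b c m hf hm
    rw [modulMemoF]
    split_ifs with h0 hmem hlt
    · exact ⟨by rw [W, if_pos h0], hm⟩
    · have hA := ih a b (c - 1) m (by omega) hm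
      have hB := ih a (b - 1) (c - 1) _ (by omega) hA.2
      have hC := ih a (b - 1) c _ (by omega) hB.2
      have hv : (modulMemoF f a b (c - 1) m).1
          + (modulMemoF f a (b - 1) (c - 1) (modulMemoF f a b (c - 1) m).2).1
          - (modulMemoF f a (b - 1) c (modulMemoF f a (b - 1) (c - 1) (modulMemoF f a b (c - 1) m).2).2).1
          = W a b c := by
        rw [hA.1, hB.1, hC.1]
        conv_rhs => rw [W]
        rw [if_neg h0, if_pos hlt]
      exact ⟨hv, memoInv_insert _ a b c _ hC.2 hv⟩
    · have hA := ih (a - 1) b c m (by omega) hm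
      have hB := ih (a - 1) (b - 1) c _ (by omega) hA.2
      have hC := ih (a - 1) b (c - 1) _ (by omega) hB.2
      have hD := ih (a - 1) (b - 1) (c - 1) _ (by omega) hC.2
      have hv : (modulMemoF f (a - 1) b c m).1
          + (modulMemoF f (a - 1) (b - 1) c (modulMemoF f (a - 1) b c m).2).1
          + (modulMemoF f (a - 1) b (c - 1) (modulMemoF f (a - 1) (b - 1) c (modulMemoF f (a - 1) b c m).2).2).1
          - (modulMemoF f (a - 1) (b - 1) (c - 1) (modulMemoF f (a - 1) b (c - 1) (modulMemoF f (a - 1) (b - 1) c (modulMemoF f (a - 1) b c m).2).2).2).1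
          = W a b c := by
        rw [hA.1, hB.1, hC.1, hD.1]
        conv_rhs => rw [W]
        rw [if_neg h0, if_neg hlt]
      exact ⟨hv, memoInv_insert _ a b c _ hD.2 hv⟩
    · refine ⟨?_, hm⟩
      rcases hm a b c with h | h
      · exact absurd (by simp [h]) hmem
      · exact h

def InRng (x : Int) : Prop := 1 ≤ x ∧ x ≤ 20

def Before (a b c x y z : Int) : Prop :=
  x < a ∨ (x = a ∧ (y < b ∨ (y = b ∧ z < c)))

def TInv (a b c : Int) (t : PySem.Dict (Int × Int × Int) Int) : Prop :=
  ∀ x y z : Int, InRng x → InRng y → InRng z → Before a b c x y z →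
    t.getD (x, y, z) 0 = W x y z

theorem getT_eq (a b c x y z : Int) (t : PySem.Dict (Int × Int × Int) Int)
    (ht : TInv a b c t) (hx : x ≤ 20) (hy : y ≤ 20) (hz : z ≤ 20)
    (hbef : x ≤ 0 ∨ y ≤ 0 ∨ z ≤ 0 ∨ x < a ∨ (x = a ∧ (y < b ∨ (y = b ∧ z < c)))) :
    getT t x y z = W x y z := by
  unfold getT
  split_ifs with h
  · rw [W, if_pos h]
  · push Not at h
    exact ht x y z ⟨by omega, hx⟩ ⟨by omega, hy⟩ ⟨by omega, hz⟩ (by unfold Before; omega)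

theorem cell_val (a b c : Int) (t : PySem.Dict (Int × Int × Int) Int)
    (ha : InRng a) (hb : InRng b) (hc : InRng c) (ht : TInv a b c t) :
    innerF a b t c = t.insert (a, b, c) (W a b c) := by
  obtain ⟨ha1, ha2⟩ := ha; obtain ⟨hb1, hb2⟩ := hb; obtain ⟨hc1, hc2⟩ := hc
  unfold innerF
  split_ifs with hlt
  · rw [getT_eq a b c _ _ _ t ht (by omega) (by omega) (by omega) (by omega),
      getT_eq a b c _ _ _ t ht (by omega) (by omega) (by omega) (by omega),
      getT_eq a b c _ _ _ t ht (by omega) (by omega) (by omega) (by omega)]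
    congr 1
    conv_rhs => rw [W]
    rw [if_neg (by omega), if_pos hlt]
  · rw [getT_eq a b c _ _ _ t ht (by omega) (by omega) (by omega) (by omega),
      getT_eq a b c _ _ _ t ht (by omega) (by omega) (by omega) (by omega),
      getT_eq a b c _ _ _ t ht (by omega) (by omega) (by omega) (by omega),
      getT_eq a b c _ _ _ t ht (by omega) (by omega) (by omega) (by omega)]
    congr 1
    conv_rhs => rw [W]
    rw [if_neg (by omega), if_neg hlt]

theorem step_c (a b c : Int) (t : PySem.Dict (Int × Int × Int) Int)
    (ha : InRng a) (hb : InRng b) (hc : InRng c) (ht : TInv a b c t) :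
    TInv a b (c + 1) (innerF a b t c) := by
  rw [cell_val a b c t ha hb hc ht]
  intro x y z hx hy hz hbef
  rw [PySem.Dict.getD_insert]
  split_ifs with h
  · simp only [Prod.mk.injEq] at h
    obtain ⟨h1, h2, h3⟩ := h
    subst h1 h2 h3
    rfl
  · simp only [Prod.mk.injEq, not_and] at h
    apply ht x y z hx hy hz
    unfold Before at hbef ⊢
    by_cases hx' : x = a
    · by_cases hy' : y = b
      · have := h hx' hy'; omega
      · omega
    · omega

theorem inner_fold (a b : Int) (ha : InRng a) (hb : InRng b) (k : Nat) :
    ∀ (c : Int) (t : PySem.Dict (Int × Int × Int) Int), c + k = 21 → 1 ≤ c → TInv a b c t →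
    TInv a b 21 (((List.range k).map (fun i : Nat => c + (i : Int))).foldl (innerF a b) t) := by
  induction k with
  | zero =>
    intro c t hck hc ht
    have : c = 21 := by omega
    subst this
    exact ht
  | succ k ih =>
    intro c t hck hc ht
    rw [List.range_succ_eq_map]
    simp only [List.map_cons, List.map_map, List.foldl_cons, Nat.cast_zero, add_zero]
    have he : ((fun i : Nat => c + (i : Int)) ∘ Nat.succ) = fun i : Nat => (c + 1) + (i : Int) := by
      funext i; simp [Nat.succ_eq_add_one]; omega
    rw [he]
    exact ih (c + 1) _ (by omega) (by omega) (step_c a b c t ha hb ⟨hc, by omega⟩ ht)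

theorem shift_b (a b : Int) (t : PySem.Dict (Int × Int × Int) Int)
    (ht : TInv a b 21 t) : TInv a (b + 1) 1 t := by
  intro x y z hx hy hz hbef
  obtain ⟨hx1, hx2⟩ := hx; obtain ⟨hy1, hy2⟩ := hy; obtain ⟨hz1, hz2⟩ := hz
  apply ht x y z ⟨hx1, hx2⟩ ⟨hy1, hy2⟩ ⟨hz1, hz2⟩
  unfold Before at hbef ⊢
  omega

theorem shift_a (a : Int) (t : PySem.Dict (Int × Int × Int) Int)
    (ht : TInv a 21 1 t) : TInv (a + 1) 1 1 t := by
  intro x y z hx hy hz hbef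
  obtain ⟨hx1, hx2⟩ := hx; obtain ⟨hy1, hy2⟩ := hy; obtain ⟨hz1, hz2⟩ := hz
  apply ht x y z ⟨hx1, hx2⟩ ⟨hy1, hy2⟩ ⟨hz1, hz2⟩
  unfold Before at hbef ⊢
  omega

theorem pyRange_21 : PySem.List.pyRange 1 21 1 = (List.range 20).map (fun i : Nat => (1 : Int) + i) := by
  decide

theorem mid_fold (a : Int) (ha : InRng a) (k : Nat) :
    ∀ (b : Int) (t : PySem.Dict (Int × Int × Int) Int), b + k = 21 → 1 ≤ b → TInv a b 1 t →
    TInv a 21 1 (((List.range k).map (fun i : Nat => b + (i : Int))).foldl (midF a) t) := by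
  induction k with
  | zero =>
    intro b t hbk hbp ht
    have : b = 21 := by omega
    subst this
    exact ht
  | succ k ih =>
    intro b t hbk hbp ht
    rw [List.range_succ_eq_map]
    simp only [List.map_cons, List.map_map, List.foldl_cons, Nat.cast_zero, add_zero]
    have he : ((fun i : Nat => b + (i : Int)) ∘ Nat.succ) = fun i : Nat => (b + 1) + (i : Int) := by
      funext i; simp [Nat.succ_eq_add_one]; omega
    rw [he]
    have hstep : TInv a (b + 1) 1 (midF a t b) := by
      apply shift_b
      unfold midF
      rw [pyRange_21]
      exact inner_fold a b ha ⟨hbp, by omega⟩ 20 1 t (by norm_num) (by norm_num) ht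
    exact ih (b + 1) _ (by omega) (by omega) hstep

theorem out_fold (k : Nat) :
    ∀ (a : Int) (t : PySem.Dict (Int × Int × Int) Int), a + k = 21 → 1 ≤ a → TInv a 1 1 t →
    TInv 21 1 1 (((List.range k).map (fun i : Nat => a + (i : Int))).foldl outF t) := by
  induction k with
  | zero =>
    intro a t hak hap ht
    have : a = 21 := by omega
    subst this
    exact ht
  | succ k ih =>
    intro a t hak hap ht
    rw [List.range_succ_eq_map]
    simp only [List.map_cons, List.map_map, List.foldl_cons, Nat.cast_zero, add_zero]
    have he : ((fun i : Nat => a + (i : Int)) ∘ Nat.succ) = fun i : Nat => (a + 1) + (i : Int) := by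
      funext i; simp [Nat.succ_eq_add_one]; omega
    rw [he]
    have hstep : TInv (a + 1) 1 1 (outF t a) := by
      apply shift_a
      unfold outF
      rw [pyRange_21]
      exact mid_fold a ⟨hap, by omega⟩ 20 1 t (by norm_num) (by norm_num) ht
    exact ih (a + 1) _ (by omega) (by omega) hstep

theorem buildW_correct (x y z : Int) (hx : InRng x) (hy : InRng y) (hz : InRng z) :
    buildW.getD (x, y, z) 0 = W x y z := by
  have hinit : TInv 1 1 1 PySem.Dict.empty := by
    intro x y z hx hy hz hbef
    exfalso
    obtain ⟨hx1, _⟩ := hx; obtain ⟨hy1, _⟩ := hy; obtain ⟨hz1, _⟩ := hz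
    unfold Before at hbef
    omega
  have hfin : TInv 21 1 1 buildW := by
    unfold buildW
    rw [pyRange_21]
    exact out_fold 20 1 PySem.Dict.empty (by norm_num) (by norm_num) hinit
  obtain ⟨hx1, hx2⟩ := hx
  exact hfin x y z ⟨hx1, hx2⟩ hy hz (Or.inl (by omega))

-- ===== VERDICT (by name: the statement is the Claim_ definition above) =====
theorem modul_spec : Claim_equal_modul := by
  intro a b c _
  unfold Spec_modul modul modul_alt
  have he : MemoInv PySem.Dict.empty := by
    intro x y z; left; simp [PySem.Dict.getD_empty]
  split_ifs with h1 h2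
  · rfl
  · rw [(memo_correct 60 20 20 20 PySem.Dict.empty (by omega) he).1,
      buildW_correct 20 20 20 ⟨by omega, by omega⟩ ⟨by omega, by omega⟩ ⟨by omega, by omega⟩]
  · rw [(memo_correct (a.toNat + b.toNat + c.toNat) a b c PySem.Dict.empty (by omega) he).1,
      buildW_correct a b c ⟨by omega, by omega⟩ ⟨by omega, by omega⟩ ⟨by omega, by omega⟩]
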